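-- pv_equiv track=rewrite | github.com/p3zo/chord-progressions | chord_progressions/solver.py | is_voicing_spaced
-- ===== SOURCE A (Python) =====
-- SPACING_CUTOFF = 52  # E3
--
-- MIN_SPACING = 4  # half steps
--
-- def is_voicing_spaced(voicing):
--     """Use the spacing of the harmonic series to inform voicing: highs closer and lows further apart.
--
--     Parameters
--     ----------
--     voicing: list[int]
--         An array of midi note numbers
--     """
--     notes_below_cutoff = sorted([n for n in voicing if n < SPACING_CUTOFF])
--
--     spacings_below_cutoff = []
--     for ix, n in enumerate(notes_below_cutoff):
--         if ix == 0:
--             continue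
--
--         spacing = n - notes_below_cutoff[ix - 1]
--         spacings_below_cutoff.append(spacing)
--
--     if all([i >= MIN_SPACING for i in spacings_below_cutoff]):
--         return True
--
--     return False
-- ===== SOURCE B (Python) =====
-- SPACING_CUTOFF = 52  # E3
--
-- MIN_SPACING = 4  # half steps
--
-- def is_voicing_spaced(voicing):
--     """Return True iff no two notes below the cutoff lie within MIN_SPACING of each other."""
--     low = [n for n in voicing if n < SPACING_CUTOFF]
--     for i in range(len(low)):
--         for j in range(i + 1, len(low)):
--             if abs(low[i] - low[j]) < MIN_SPACING:
--                 return False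
--     return True
-- ===== Notes on version B (the rewrite author's own statement) =====
-- stated objective: alternative
-- what changed: Replaces A's sort + adjacent-gap pass with a direct pairwise check on the unsorted filtered list: every pair of notes below the cutoff must differ by at least MIN_SPACING, returning False at the first close pair (no sort, no spacing list).
import Mathlib
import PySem

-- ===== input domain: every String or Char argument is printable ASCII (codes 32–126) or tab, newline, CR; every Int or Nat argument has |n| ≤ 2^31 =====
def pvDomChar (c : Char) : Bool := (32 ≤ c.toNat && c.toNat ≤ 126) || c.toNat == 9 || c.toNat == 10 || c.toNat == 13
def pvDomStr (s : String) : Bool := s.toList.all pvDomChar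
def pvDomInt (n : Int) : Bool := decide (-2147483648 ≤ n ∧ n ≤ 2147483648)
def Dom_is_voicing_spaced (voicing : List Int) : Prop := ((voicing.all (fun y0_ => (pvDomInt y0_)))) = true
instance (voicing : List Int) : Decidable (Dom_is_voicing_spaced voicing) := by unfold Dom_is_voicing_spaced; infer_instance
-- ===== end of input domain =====

-- B replaces A's sort + adjacent-gap pass with a direct pairwise distance check on the unsorted filtered list (alternative decomposition, same result).


-- ===== PORT A =====
-- notes_below_cutoff[ix-1]: ix ≥ 1 and ix < len here, so the index is always in range; pyGetD is exact.
def is_voicing_spaced (voicing : List Int) : Bool :=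
  let notes_below_cutoff :=
    PySem.List.sorted (voicing.filter (fun n => n < 52)) (fun x => x) false
  let spacings_below_cutoff :=
    (PySem.List.enumerate notes_below_cutoff).foldl
      (fun acc p =>
        if p.1 == 0 then acc
        else acc ++ [p.2 - PySem.List.pyGetD notes_below_cutoff (p.1 - 1) 0]) []
  if spacings_below_cutoff.all (fun i => decide (4 ≤ i)) then true else false

-- ===== PORT B =====
-- the nested loop of Source B: head against every later element, then recurse on the tail
def pvPairsOK : List Int → Bool
  | [] => true
  | x :: xs => (xs.all (fun y => decide (4 ≤ |x - y|))) && pvPairsOK xs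

def is_voicing_spaced_alt (voicing : List Int) : Bool :=
  pvPairsOK (voicing.filter (fun n => n < 52))

-- ===== PRECONDITION & SPEC =====
def Spec_is_voicing_spaced (voicing : List Int) (out : Bool) : Prop := out = is_voicing_spaced_alt voicing
instance (voicing : List Int) (out : Bool) : Decidable (Spec_is_voicing_spaced voicing out) := by unfold Spec_is_voicing_spaced; infer_instance

-- ===== CLAIM (what is proved, stated in full; the proofs are below) =====
def Claim_equal_is_voicing_spaced : Prop := ∀ (voicing : List Int), Dom_is_voicing_spaced voicing → Spec_is_voicing_spaced voicing (is_voicing_spaced voicing)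

-- ===== LEMMAS AND PROOFS =====

-- B side: pvPairsOK decides Pairwise of the symmetric distance relation
theorem pvPairsOK_iff (l : List Int) :
    pvPairsOK l = true ↔ l.Pairwise (fun a b => 4 ≤ |a - b|) := by
  induction l with
  | nil => simp [pvPairsOK]
  | cons x xs ih =>
    simp [pvPairsOK, List.pairwise_cons, ih, List.all_eq_true, and_comm]

-- A side: the enumerate-fold builds exactly the adjacent differences of the tail
theorem pvSpac_aux (notes : List Int) (xs : List Int) : ∀ (pre' : List Int) (lastv : Int)
    (acc : List Int), notes = pre' ++ lastv :: xs →
    (PySem.List.enumerate xs ((pre'.length : Int) + 1)).foldl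
      (fun acc p =>
        if p.1 == 0 then acc
        else acc ++ [p.2 - PySem.List.pyGetD notes (p.1 - 1) 0]) acc
    = acc ++ List.zipWith (fun b a => b - a) xs (lastv :: xs) := by
  induction xs with
  | nil => intro pre' lastv acc h; simp [PySem.List.enumerate_nil]
  | cons x xs ih =>
    intro pre' lastv acc h
    rw [PySem.List.enumerate_cons, List.foldl_cons]
    have hne : (((pre'.length : Int) + 1) == 0) = false := by
      simp; omega
    rw [hne]
    simp only [Bool.false_eq_true, if_false, Int.add_sub_cancel]
    have hget : PySem.List.pyGetD notes (pre'.length : Int) 0 = lastv := by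
      rw [PySem.List.pyGetD_natCast, h]
      rw [List.getD_eq_getElem?_getD, List.getElem?_append_right (le_refl pre'.length)]
      simp
    rw [hget]
    have h2 : notes = (pre' ++ [lastv]) ++ x :: xs := by simp [h]
    have := ih (pre' ++ [lastv]) x (acc ++ [x - lastv]) h2
    simp only [List.length_append, List.length_cons, List.length_nil] at this
    have harg : ((pre'.length : Int) + 1 + 1) = (((pre'.length + (0 + 1) : Nat) : Int) + 1) := by
      push_cast; ring
    rw [harg, this]
    simp

theorem pvSpacings_eq (notes : List Int) :
    (PySem.List.enumerate notes).foldl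
      (fun acc p =>
        if p.1 == 0 then acc
        else acc ++ [p.2 - PySem.List.pyGetD notes (p.1 - 1) 0]) []
    = List.zipWith (fun b a => b - a) notes.tail notes := by
  cases notes with
  | nil => simp [PySem.List.enumerate_nil]
  | cons x xs =>
    rw [PySem.List.enumerate_cons, List.foldl_cons]
    simp only [BEq.rfl, if_true]
    have := pvSpac_aux (x :: xs) xs [] x [] (by simp)
    norm_num at this ⊢
    rw [this]

-- adjacent gaps all ≥ 4 ↔ every element is at least 4 above its predecessor
theorem pvAll_zip_iff (notes : List Int) :
    ((List.zipWith (fun b a => b - a) notes.tail notes).all (fun i => decide (4 ≤ i))) = true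
      ↔ List.IsChain (fun a b : Int => a + 4 ≤ b) notes := by
  induction notes with
  | nil => simp
  | cons a t ih =>
    cases t with
    | nil => simp
    | cons b u =>
      simp only [List.tail_cons] at ih ⊢
      rw [List.zipWith_cons_cons, List.all_cons, List.isChain_cons_cons]
      constructor
      · intro h
        rw [Bool.and_eq_true] at h
        exact ⟨by have := of_decide_eq_true h.1; omega, ih.1 h.2⟩
      · rintro ⟨h1, h2⟩
        rw [Bool.and_eq_true]
        exact ⟨decide_eq_true (by omega), ih.2 h2⟩

theorem pvAB (l : List Int) :
    (if ((List.zipWith (fun b a => b - a)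
          (PySem.List.sorted l (fun x => x) false).tail
          (PySem.List.sorted l (fun x => x) false)).all (fun i => decide (4 ≤ i))) then true else false)
      = pvPairsOK l := by
  have hsym : Symmetric (fun a b : Int => 4 ≤ |a - b|) := by
    intro a b h; rw [abs_sub_comm]; exact h
  have hiff : List.IsChain (fun a b : Int => a + 4 ≤ b) (PySem.List.sorted l (fun x => x) false)
      ↔ l.Pairwise (fun a b : Int => 4 ≤ |a - b|) := by
    haveI : Trans (fun a b : Int => a + 4 ≤ b) (fun a b : Int => a + 4 ≤ b)
        (fun a b : Int => a + 4 ≤ b) := ⟨fun h1 h2 => by omega⟩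
    rw [List.isChain_iff_pairwise]
    constructor
    · intro h
      refine ((PySem.List.sorted_perm l (fun x => x) false).pairwise_iff (fun h => hsym h)).1 ?_
      exact h.imp (fun {a b} hab => by rcases abs_cases (a - b) with ⟨he, _⟩ | ⟨he, _⟩ <;> omega)
    · intro h
      have hs := PySem.List.sorted_pairwise l (fun x => x)
      have hd := ((PySem.List.sorted_perm l (fun x => x) false).pairwise_iff (fun h => hsym h)).2 h
      exact (hs.and hd).imp (fun {a b} hab => by
        rcases hab with ⟨hle, habs⟩
        rcases abs_cases (a - b) with ⟨he, _⟩ | ⟨he, _⟩ <;> omega)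
  rw [← pvPairsOK_iff] at hiff
  rw [← pvAll_zip_iff] at hiff
  cases h : (List.zipWith (fun b a => b - a)
          (PySem.List.sorted l (fun x => x) false).tail
          (PySem.List.sorted l (fun x => x) false)).all (fun i => decide (4 ≤ i)) with
  | true => simp only [if_true]; exact (hiff.1 h).symm
  | false =>
    simp only [Bool.false_eq_true, if_false]
    cases hp : pvPairsOK l with
    | true => exact absurd (hiff.2 hp) (by simp [h])
    | false => rfl

-- ===== VERDICT (by name: the statement is the Claim_ definition above) =====
theorem is_voicing_spaced_spec : Claim_equal_is_voicing_spaced := by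
  intro v _
  unfold Spec_is_voicing_spaced is_voicing_spaced is_voicing_spaced_alt
  dsimp only
  rw [pvSpacings_eq]
  exact pvAB _
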